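-- pv_equiv track=rewrite | github.com/pypi-data/pypi-mirror-7 | packages/argpext/argpext-1.2.2.tar.gz/argpext-1.2.2/argpext/tasks.py | _argsplit
-- ===== SOURCE A (Python) =====
-- def _argsplit(args,keys):
--     # Find: L,R: argument splitting into shallow and deleg parts
--     L = []
--     R = []
--     ptr = L
--     for i,arg in enumerate(args):
--         if len(R) or arg in keys:
--             ptr = R
--         ptr += [arg]
--     return L,R
-- ===== SOURCE B (Python) =====
-- def _argsplit(args, keys):
--     i = next((j for j, arg in enumerate(args) if arg in keys), len(args))
--     return list(args[:i]), list(args[i:])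
-- ===== Notes on version B (the rewrite author's own statement) =====
-- stated objective: simpler
-- what changed: Replaces the pointer-toggle accumulation loop with finding the first split index and slicing the sequence there.
import Mathlib
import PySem

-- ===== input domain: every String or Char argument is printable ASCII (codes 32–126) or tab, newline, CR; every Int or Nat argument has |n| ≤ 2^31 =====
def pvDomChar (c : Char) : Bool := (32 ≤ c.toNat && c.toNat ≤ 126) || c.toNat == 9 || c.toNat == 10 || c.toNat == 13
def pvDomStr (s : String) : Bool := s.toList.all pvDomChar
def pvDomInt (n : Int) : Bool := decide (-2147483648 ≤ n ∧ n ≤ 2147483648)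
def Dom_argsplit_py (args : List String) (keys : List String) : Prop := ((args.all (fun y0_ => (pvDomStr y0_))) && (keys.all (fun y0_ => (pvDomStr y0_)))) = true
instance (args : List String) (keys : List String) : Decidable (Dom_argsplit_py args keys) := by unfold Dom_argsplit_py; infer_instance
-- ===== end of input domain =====

-- B finds the first split index and slices there, instead of A's pointer-toggle single-pass accumulation; objective: simpler.

-- ===== PORT A =====
-- A's loop carries (L, R) and appends each arg to R once R is nonempty or the arg is a key, else to L.
def argsplit_py (args : List String) (keys : List String) : List String × List String :=
  args.foldl
    (fun s arg =>
      if s.2.length != 0 || keys.contains arg then (s.1, s.2 ++ [arg])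
      else (s.1 ++ [arg], s.2))
    ([], [])

-- ===== PORT B =====
-- B: i = index of first arg in keys (len(args) if none), then slice.
def argsplit_py_alt (args : List String) (keys : List String) : List String × List String :=
  let i := args.findIdx (fun a => keys.contains a)
  (args.take i, args.drop i)

-- ===== PRECONDITION & SPEC =====
def Spec_argsplit_py (args : List String) (keys : List String) (out : List String × List String) : Prop := out = argsplit_py_alt args keys
instance (args : List String) (keys : List String) (out : List String × List String) : Decidable (Spec_argsplit_py args keys out) := by unfold Spec_argsplit_py; infer_instance

-- ===== CLAIM (what is proved, stated in full; the proofs are below) =====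
def Claim_equal_argsplit_py : Prop := ∀ (args : List String) (keys : List String), Dom_argsplit_py args keys → Spec_argsplit_py args keys (argsplit_py args keys)

-- ===== LEMMAS AND PROOFS =====

-- Once R is nonempty, every remaining arg is appended to R.
theorem argsplit_foldl_R_ne (keys : List String) (args : List String) (L R : List String)
    (h : R ≠ []) :
    args.foldl
      (fun s arg =>
        if s.2.length != 0 || keys.contains arg then (s.1, s.2 ++ [arg])
        else (s.1 ++ [arg], s.2))
      (L, R) = (L, R ++ args) := by
  induction args generalizing R with
  | nil => simp
  | cons a t ih =>
    have hlen : R.length ≠ 0 := by simpa using h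
    simp only [List.foldl_cons]
    rw [if_pos (by simp [hlen])]
    rw [ih (R ++ [a]) (by simp)]
    simp

theorem argsplit_foldl_eq (keys : List String) (args : List String) (L : List String) :
    args.foldl
      (fun s arg =>
        if s.2.length != 0 || keys.contains arg then (s.1, s.2 ++ [arg])
        else (s.1 ++ [arg], s.2))
      (L, []) =
    (L ++ args.take (args.findIdx (fun a => keys.contains a)),
     args.drop (args.findIdx (fun a => keys.contains a))) := by
  induction args generalizing L with
  | nil => simp
  | cons a t ih =>
    simp only [List.foldl_cons]
    by_cases hk : a ∈ keys
    · rw [if_pos (by simp [hk])]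
      simp only [List.nil_append]
      rw [argsplit_foldl_R_ne keys t L [a] (by simp)]
      simp [List.findIdx_cons, hk]
    · rw [if_neg (by simp [hk])]
      rw [ih (L ++ [a])]
      simp [List.findIdx_cons, hk]

-- ===== VERDICT (by name: the statement is the Claim_ definition above) =====
theorem argsplit_py_spec : Claim_equal_argsplit_py := by
  intro args keys _
  show _ = _
  rw [argsplit_py, argsplit_py_alt, argsplit_foldl_eq keys args []]
  simp
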